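-- pv_equiv track=rewrite | github.com/pmannion2/ignition-nvim | lsp/ignition_lsp/project_scanner.py | _find_key_line
-- ===== SOURCE A (Python) =====
-- def _find_key_line(raw_text: str, key: str, value_prefix: str) -> int:
--     """Find the line number of a script key in raw JSON text.
--
--     Searches for the pattern `"key": "value_start...` to locate the line.
--     Returns 1-based line number, or 1 if not found.
--     """
--     # Build a search pattern: "key": " followed by start of value
--     search_key = f'"{key}"'
--     # Use the first 40 chars of the value for matching (avoid huge strings)
--     value_start = value_prefix[:40].replace("\n", "\\n")
--
--     lines = raw_text.splitlines()
--     for i, line in enumerate(lines, 1):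
--         if search_key in line and value_start[:20] in line:
--             return i
--
--     # Fallback: just find the key
--     for i, line in enumerate(lines, 1):
--         if search_key in line:
--             return i
--
--     return 1
-- ===== SOURCE B (Python) =====
-- def _find_key_line(raw_text: str, key: str, value_prefix: str) -> int:
--     """Single pass: return the first combined (key+value) match immediately;
--     remember the first key-only line as a fallback; default 1."""
--     search_key = f'"{key}"'
--     needle = value_prefix[:40].replace("\n", "\\n")[:20]
--     fallback = None
--     for i, line in enumerate(raw_text.splitlines(), 1):
--         if search_key in line:
--             if needle in line:
--                 return i
--             if fallback is None:
--                 fallback = i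
--     return fallback if fallback is not None else 1
-- ===== Notes on version B (the rewrite author's own statement) =====
-- stated objective: simpler
-- what changed: Replaces A's two sequential scans over the line list (combined match pass, then key-only pass) with a single pass that returns a combined match immediately and records the first key-only line in a nullable fallback returned at the end.
import Mathlib
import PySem

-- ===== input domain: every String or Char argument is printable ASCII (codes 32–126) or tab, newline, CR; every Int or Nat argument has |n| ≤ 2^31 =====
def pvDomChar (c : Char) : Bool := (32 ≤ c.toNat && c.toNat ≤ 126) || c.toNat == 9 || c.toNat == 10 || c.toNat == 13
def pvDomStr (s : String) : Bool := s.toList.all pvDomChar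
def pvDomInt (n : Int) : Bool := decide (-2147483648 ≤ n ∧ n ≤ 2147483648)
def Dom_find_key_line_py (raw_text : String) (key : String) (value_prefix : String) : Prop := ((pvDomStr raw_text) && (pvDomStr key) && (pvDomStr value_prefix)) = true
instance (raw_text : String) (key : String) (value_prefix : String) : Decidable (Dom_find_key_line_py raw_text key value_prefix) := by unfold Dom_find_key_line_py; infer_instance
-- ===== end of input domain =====

-- B replaces A's two sequential scans with one pass keeping a nullable key-only fallback (simpler; same result).

-- ===== PORT A =====
-- first loop of A: return i on the first line containing both search_key and value_start[:20]
def pvAFindBoth (sk vs : List Char) (i : Int) : List (List Char) → Option Int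
  | [] => none
  | l :: ls =>
    if PySem.Chars.isIn sk l && PySem.Chars.isIn vs l then some i
    else pvAFindBoth sk vs (i + 1) ls

-- second (fallback) loop of A: return i on the first line containing search_key
def pvAFindKey (sk : List Char) (i : Int) : List (List Char) → Option Int
  | [] => none
  | l :: ls =>
    if PySem.Chars.isIn sk l then some i
    else pvAFindKey sk (i + 1) ls

def find_key_line_py (raw_text : String) (key : String) (value_prefix : String) : Int :=
  -- search_key = f'"{key}"'
  let searchKey : List Char := '"' :: key.toList ++ ['"']
  -- value_start = value_prefix[:40].replace("\n", "\\n")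
  let valueStart : List Char :=
    PySem.Chars.replace (PySem.List.slice value_prefix.toList none (some 40)) ['\n'] ['\\', 'n']
  let lines := PySem.Chars.splitlines raw_text.toList
  match pvAFindBoth searchKey (PySem.List.slice valueStart none (some 20)) 1 lines with
  | some i => i
  | none =>
    match pvAFindKey searchKey 1 lines with
    | some i => i
    | none => 1

-- ===== PORT B =====
-- single pass: immediate return on combined match, first key-only line kept as fallback
def pvBLoop (sk vs : List Char) (i : Int) (fb : Option Int) : List (List Char) → Int
  | [] => fb.getD 1
  | l :: ls =>
    if PySem.Chars.isIn sk l then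
      if PySem.Chars.isIn vs l then i
      else if fb.isNone then pvBLoop sk vs (i + 1) (some i) ls
      else pvBLoop sk vs (i + 1) fb ls
    else pvBLoop sk vs (i + 1) fb ls

def find_key_line_py_alt (raw_text : String) (key : String) (value_prefix : String) : Int :=
  let searchKey : List Char := '"' :: key.toList ++ ['"']
  -- needle = value_prefix[:40].replace("\n", "\\n")[:20]
  let needle : List Char :=
    PySem.List.slice
      (PySem.Chars.replace (PySem.List.slice value_prefix.toList none (some 40)) ['\n'] ['\\', 'n'])
      none (some 20)
  pvBLoop searchKey needle 1 none (PySem.Chars.splitlines raw_text.toList)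

-- ===== PRECONDITION & SPEC =====
def Spec_find_key_line_py (raw_text : String) (key : String) (value_prefix : String) (out : Int) : Prop := out = find_key_line_py_alt raw_text key value_prefix
instance (raw_text : String) (key : String) (value_prefix : String) (out : Int) : Decidable (Spec_find_key_line_py raw_text key value_prefix out) := by unfold Spec_find_key_line_py; infer_instance

-- ===== CLAIM (what is proved, stated in full; the proofs are below) =====
def Claim_equal_find_key_line_py : Prop := ∀ (raw_text : String) (key : String) (value_prefix : String), Dom_find_key_line_py raw_text key value_prefix → Spec_find_key_line_py raw_text key value_prefix (find_key_line_py raw_text key value_prefix)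

-- ===== LEMMAS AND PROOFS =====

-- B's single pass computes A's two-pass result, for any starting index and pending fallback.
theorem pvBLoop_eq (sk vs : List Char) (ls : List (List Char)) :
    ∀ (i : Int) (fb : Option Int),
      pvBLoop sk vs i fb ls =
        match pvAFindBoth sk vs i ls with
        | some j => j
        | none =>
          match fb with
          | some f => f
          | none => (pvAFindKey sk i ls).getD 1 := by
  induction ls with
  | nil => intro i fb; cases fb <;> simp [pvBLoop, pvAFindBoth, pvAFindKey]
  | cons l ls ih =>
    intro i fb
    by_cases hk : PySem.Chars.isIn sk l = true
    · by_cases hv : PySem.Chars.isIn vs l = true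
      · simp [pvBLoop, pvAFindBoth, hk, hv]
      · cases fb <;>
          simp [pvBLoop, pvAFindBoth, pvAFindKey, hk, hv, ih]
    · cases fb <;>
        simp [pvBLoop, pvAFindBoth, pvAFindKey, hk, ih]

-- A's two-pass result equals B's single pass (let-free form).
theorem pvTwoPass_eq (sk vs : List Char) (ls : List (List Char)) :
    (match pvAFindBoth sk vs 1 ls with
     | some i => i
     | none =>
       match pvAFindKey sk 1 ls with
       | some i => i
       | none => (1 : Int)) = pvBLoop sk vs 1 none ls := by
  rw [pvBLoop_eq]
  generalize pvAFindBoth sk vs 1 ls = fb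
  generalize pvAFindKey sk 1 ls = fk
  cases fb <;> cases fk <;> rfl

-- ===== VERDICT (by name: the statement is the Claim_ definition above) =====
theorem find_key_line_py_spec : Claim_equal_find_key_line_py := by
  intro raw_text key value_prefix _
  exact pvTwoPass_eq ('"' :: key.toList ++ ['"'])
    (PySem.List.slice
      (PySem.Chars.replace (PySem.List.slice value_prefix.toList none (some 40)) ['\n'] ['\\', 'n'])
      none (some 20))
    (PySem.Chars.splitlines raw_text.toList)
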